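-- pv_equiv track=rewrite | github.com/burtonrj/CytoPy | CytoPy/data/panel.py | create_regex
-- ===== SOURCE A (Python) =====
-- def create_regex(s: str, initials: bool = True) -> str:
--     """
--     Given a string representation of either a channel or marker, generate a standard
--     regex string to be used in a panel template
--
--     Parameters
--     ----------
--     s: str
--         String value of channel or marker to generate regex term for
--     initials: bool, (default=True)
--         If True, account for use of initials to represent a marker/channel name
--
--     Returns
--     -------
--     str
--         Formatted regex string
--     """
--     def has_numbers(inputString):
--         return any(char.isdigit() for char in inputString)
--
--     s = [i for ls in [_.split('-') for _ in s.split(' ')] for i in ls]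
--     s = [i for ls in [_.split('.') for _ in s] for i in ls]
--     s = [i for ls in [_.split('/') for _ in s] for i in ls]
--     new_string = list()
--     for i in s:
--         if not has_numbers(i) and len(i) > 2 and initials:
--             new_string.append(f'{i[0]}({i[1:]})*')
--         else:
--             new_string.append(i)
--     new_string = '[\s.-]+'.join(new_string)
--     new_string = '<*\s*' + new_string + '\s*>*'
--     return new_string
-- ===== SOURCE B (Python) =====
-- def create_regex(s: str, initials: bool = True) -> str:
--     """Single character-level scan: tokenize on all four delimiters at once,
--     then format each token; avoids A's three split-and-flatten passes."""
--     def fmt(tok):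
--         if initials and len(tok) > 2 and not any(c.isdigit() for c in tok):
--             return tok[0] + '(' + tok[1:] + ')*'
--         return tok
--
--     pieces = []
--     tok = ''
--     for ch in s:
--         if ch in ' -./':
--             pieces.append(tok)
--             tok = ''
--         else:
--             tok += ch
--     pieces.append(tok)
--     return '<*\s*' + '[\s.-]+'.join(fmt(t) for t in pieces) + '\s*>*'
-- ===== Notes on version B (the rewrite author's own statement) =====
-- stated objective: idiomatic
-- what changed: Replaces A's three sequential split-and-flatten passes (on '-', '.', '/') plus a separate formatting loop with a single character-level scan that tokenizes on all four delimiters at once, then formats tokens in one map-and-join.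
import Mathlib
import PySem

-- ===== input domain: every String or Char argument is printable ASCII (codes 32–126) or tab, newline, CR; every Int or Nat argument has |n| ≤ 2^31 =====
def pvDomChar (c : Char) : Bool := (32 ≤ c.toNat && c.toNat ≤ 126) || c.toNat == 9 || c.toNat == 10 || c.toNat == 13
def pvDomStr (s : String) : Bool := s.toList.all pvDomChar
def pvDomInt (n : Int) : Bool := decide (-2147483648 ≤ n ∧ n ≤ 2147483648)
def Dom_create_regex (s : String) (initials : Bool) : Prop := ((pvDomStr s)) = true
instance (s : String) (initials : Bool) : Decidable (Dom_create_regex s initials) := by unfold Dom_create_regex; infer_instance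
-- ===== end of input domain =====

-- B tokenizes on the four delimiter characters in one scan instead of A's three split-and-flatten passes; return values are identical.

-- ===== PORT A =====
-- has_numbers(inputString) = any(char.isdigit() for char in inputString)
def pyHasNumbers (cs : List Char) : Bool := cs.any PySem.Chars.isdigit

def create_regex (s : String) (initials : Bool) : String :=
  -- s = [i for ls in [_.split('-') for _ in s.split(' ')] for i in ls]
  let s1 : List (List Char) :=
    ((PySem.Chars.splitOn s.toList [' ']).map (fun t => PySem.Chars.splitOn t ['-'])).flatten
  -- s = [i for ls in [_.split('.') for _ in s] for i in ls]
  let s2 : List (List Char) := (s1.map (fun t => PySem.Chars.splitOn t ['.'])).flatten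
  -- s = [i for ls in [_.split('/') for _ in s] for i in ls]
  let s3 : List (List Char) := (s2.map (fun t => PySem.Chars.splitOn t ['/'])).flatten
  -- the for-loop appending to new_string
  let newString : List (List Char) :=
    s3.foldl (fun acc i =>
      if (!pyHasNumbers i && decide (i.length > 2)) && initials then
        acc ++ [i.take 1 ++ ['('] ++ i.drop 1 ++ [')', '*']]
      else acc ++ [i]) []
  -- '[\s.-]+'.join(new_string), then '<*\s*' + … + '\s*>*'
  String.mk ("<*\\s*".toList ++ PySem.Chars.join "[\\s.-]+".toList newString ++ "\\s*>*".toList)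

-- ===== PORT B =====
-- fmt(tok) from Source B
def bFmt (initials : Bool) (tok : List Char) : List Char :=
  if initials && decide (tok.length > 2) && !tok.any PySem.Chars.isdigit then
    tok.take 1 ++ ['('] ++ tok.drop 1 ++ [')', '*']
  else tok

-- ch in ' -./'
def bIsDelim (c : Char) : Bool := c == ' ' || c == '-' || c == '.' || c == '/'

def create_regex_alt (s : String) (initials : Bool) : String :=
  -- the single scan building (pieces, tok)
  let st : List (List Char) × List Char :=
    s.toList.foldl (fun st ch =>
      if bIsDelim ch then (st.1 ++ [st.2], []) else (st.1, st.2 ++ [ch])) ([], [])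
  let pieces : List (List Char) := st.1 ++ [st.2]
  String.mk ("<*\\s*".toList ++
    PySem.Chars.join "[\\s.-]+".toList (pieces.map (bFmt initials)) ++ "\\s*>*".toList)

-- ===== PRECONDITION & SPEC =====
def Spec_create_regex (s : String) (initials : Bool) (out : String) : Prop := out = create_regex_alt s initials
instance (s : String) (initials : Bool) (out : String) : Decidable (Spec_create_regex s initials out) := by unfold Spec_create_regex; infer_instance

-- ===== CLAIM (what is proved, stated in full; the proofs are below) =====
def Claim_equal_create_regex : Prop := ∀ (s : String) (initials : Bool), Dom_create_regex s initials → Spec_create_regex s initials (create_regex s initials)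

-- ===== LEMMAS AND PROOFS =====

-- Reference tokenizer (proof-only): split a char list at every char satisfying p, keeping empties.
def toks (p : Char → Bool) : List Char → List (List Char)
  | [] => [[]]
  | c :: cs => if p c then [] :: toks p cs else (toks p cs).modifyHead (c :: ·)

theorem toks_ne_nil (p : Char → Bool) (cs : List Char) : toks p cs ≠ [] := by
  induction cs with
  | nil => simp [toks]
  | cons c cs ih =>
    simp only [toks]
    split
    · simp
    · cases h : toks p cs with
      | nil => exact absurd h ih
      | cons a t => simp

theorem modifyHead_fun_id {α : Type} (l : List α) : l.modifyHead (fun x => x) = l := by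
  cases l <;> simp

theorem modifyHead_append_of_ne_nil {α : Type} (f : α → α) (l m : List α) (h : l ≠ []) :
    (l ++ m).modifyHead f = l.modifyHead f ++ m := by
  cases l with
  | nil => exact absurd rfl h
  | cons a t => simp

-- Splitting every token of (toks p) further on q and flattening = tokenizing on (p or q) at once.
theorem toks_comp (p q : Char → Bool) (cs : List Char) :
    ((toks p cs).map (toks q)).flatten = toks (fun c => p c || q c) cs := by
  induction cs with
  | nil => simp [toks]
  | cons c cs ih =>
    by_cases hp : p c = true
    · simp [toks, hp, ih]
    · simp only [Bool.not_eq_true] at hp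
      cases htl : toks p cs with
      | nil => exact absurd htl (toks_ne_nil p cs)
      | cons h t =>
        have h3 : toks p (c :: cs) = ((h :: t).modifyHead (c :: ·)) := by
          simp [toks, hp, htl]
        by_cases hq : q c = true
        · have h2 : toks (fun c => p c || q c) (c :: cs) = [] :: toks (fun c => p c || q c) cs := by
            simp [toks, hp, hq]
          rw [h3, h2, ← ih, htl]
          simp [toks, hq]
        · simp only [Bool.not_eq_true] at hq
          have h2 : toks (fun c => p c || q c) (c :: cs) =
              (toks (fun c => p c || q c) cs).modifyHead (c :: ·) := by
            simp [toks, hp, hq]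
          rw [h3, h2, ← ih, htl]
          have h4 : toks q (c :: h) = (toks q h).modifyHead (c :: ·) := by simp [toks, hq]
          simp only [List.modifyHead_cons, List.map_cons, List.flatten_cons, h4]
          rw [modifyHead_append_of_ne_nil _ _ _ (toks_ne_nil q h)]

-- PySem's splitOn on a single-char separator is toks (· == d).
theorem splitOn_go_single (d : Char) :
    ∀ (fuel : Nat) (l cur : List Char) (acc : List (List Char)), l.length ≤ fuel →
    PySem.Chars.splitOn.go [d] fuel l cur acc =
      acc.reverse ++ (toks (· == d) l).modifyHead (cur.reverse ++ ·) := by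
  intro fuel
  induction fuel with
  | zero =>
    intro l cur acc h
    have : l = [] := List.length_eq_zero_iff.mp (Nat.le_zero.mp h)
    subst this
    simp [PySem.Chars.splitOn.go, toks]
  | succ fuel ih =>
    intro l cur acc h
    cases l with
    | nil => simp [PySem.Chars.splitOn.go, toks]
    | cons c rest =>
      rw [PySem.Chars.splitOn.go]
      by_cases hc : c = d
      · subst hc
        rw [if_pos (by simp [List.isPrefixOf])]
        have hd : List.drop [c].length (c :: rest) = rest := by simp
        rw [hd, ih rest [] (cur.reverse :: acc) (by simpa using h)]
        simp [toks, modifyHead_fun_id]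
      · rw [if_neg (by simp [List.isPrefixOf, Ne.symm hc])]
        rw [ih rest (c :: cur) acc (by simpa using h)]
        have h2 : toks (· == d) (c :: rest) = (toks (· == d) rest).modifyHead (c :: ·) := by
          simp [toks, hc]
        rw [h2, List.modifyHead_modifyHead]
        simp [Function.comp_def]

theorem splitOn_single (d : Char) (cs : List Char) :
    PySem.Chars.splitOn cs [d] = toks (· == d) cs := by
  rw [PySem.Chars.splitOn, splitOn_go_single d (cs.length + 1) cs [] [] (by omega)]
  cases h : toks (· == d) cs with
  | nil => exact absurd h (toks_ne_nil _ cs)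
  | cons a t => simp

-- B's scan produces exactly toks bIsDelim.
theorem scan_toks :
    ∀ (cs : List Char) (acc : List (List Char)) (tok : List Char),
    (cs.foldl (fun st ch =>
        if bIsDelim ch then (st.1 ++ [st.2], ([] : List Char)) else (st.1, st.2 ++ [ch]))
      (acc, tok)).1 ++
    [(cs.foldl (fun st ch =>
        if bIsDelim ch then (st.1 ++ [st.2], ([] : List Char)) else (st.1, st.2 ++ [ch]))
      (acc, tok)).2] =
    acc ++ (toks bIsDelim cs).modifyHead (tok ++ ·) := by
  intro cs
  induction cs with
  | nil => intro acc tok; simp [toks]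
  | cons c cs ih =>
    intro acc tok
    by_cases hc : bIsDelim c = true
    · simp only [List.foldl_cons, if_pos hc]
      rw [ih (acc ++ [tok]) []]
      cases h : toks bIsDelim cs with
      | nil => exact absurd h (toks_ne_nil _ cs)
      | cons a t => simp [toks, hc, h]
    · simp only [List.foldl_cons, if_neg hc]
      rw [ih acc (tok ++ [c])]
      have : toks bIsDelim (c :: cs) = (toks bIsDelim cs).modifyHead (c :: ·) := by
        simp [toks, hc]
      rw [this, List.modifyHead_modifyHead]
      simp [Function.comp_def]

-- A's append-in-a-loop equals B's map, with the same per-token formatting.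
theorem fold_fmt (initials : Bool) (l : List (List Char)) :
    l.foldl (fun acc i =>
      if (!pyHasNumbers i && decide (i.length > 2)) && initials then
        acc ++ [i.take 1 ++ ['('] ++ i.drop 1 ++ [')', '*']]
      else acc ++ [i]) [] = l.map (bFmt initials) := by
  have h : ∀ (acc : List (List Char)) (i : List Char),
      (if ((!pyHasNumbers i && decide (i.length > 2)) && initials) = true then
        acc ++ [i.take 1 ++ ['('] ++ i.drop 1 ++ [')', '*']]
      else acc ++ [i]) = acc ++ [bFmt initials i] := by
    intro acc i
    unfold bFmt pyHasNumbers
    have hcond : ((!i.any PySem.Chars.isdigit && decide (i.length > 2)) && initials) =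
        (initials && decide (i.length > 2) && !i.any PySem.Chars.isdigit) := by
      cases i.any PySem.Chars.isdigit <;> cases (decide (i.length > 2)) <;> cases initials <;> rfl
    rw [hcond]
    split <;> rfl
  simp only [h]
  rw [PySem.List.foldl_append_singleton_eq_map]
  simp

-- ===== VERDICT (by name: the statement is the Claim_ definition above) =====
theorem create_regex_spec : Claim_equal_create_regex := by
  intro s initials _
  unfold Spec_create_regex create_regex create_regex_alt
  simp only [splitOn_single, fold_fmt]
  have htok : ((((s.toList |> toks (· == ' ')).map (toks (· == '-'))).flatten.map
      (toks (· == '.'))).flatten.map (toks (· == '/'))).flatten = toks bIsDelim s.toList := by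
    rw [toks_comp, toks_comp, toks_comp]
    have : (fun c => (((c == ' ') || (c == '-')) || (c == '.')) || (c == '/')) = bIsDelim := by
      funext c; simp [bIsDelim]
    rw [this]
  rw [htok]
  have hscan := scan_toks s.toList [] []
  simp only [List.nil_append, modifyHead_fun_id] at hscan
  rw [hscan]
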